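-- pv_equiv track=rewrite | github.com/MrBrantCode/unitest_baseline | mut_generate/mist_train_taco/taco_19290/solution.py | find_smelt_fishing_winner
-- ===== SOURCE A (Python) =====
-- def find_smelt_fishing_winner(participants):
--     # Dictionary to store the number of fish caught as keys and list of participant numbers as values
--     fish_dict = {}
--
--     for participant, fish_count in participants:
--         if fish_count not in fish_dict:
--             fish_dict[fish_count] = []
--         fish_dict[fish_count].append(participant)
--
--     # Find the maximum number of fish caught
--     max_fish_count = max(fish_dict)
--
--     # Find the winner with the lowest participant number among those who caught the maximum fish
--     winner = min(fish_dict[max_fish_count])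
--
--     return winner, max_fish_count
-- ===== SOURCE B (Python) =====
-- def find_smelt_fishing_winner(participants):
--     # single pass: keep the best (participant, fish_count) seen so far,
--     # preferring more fish, then the lower participant number
--     best_p, best_f = participants[0]
--     for p, f in participants[1:]:
--         if f > best_f or (f == best_f and p < best_p):
--             best_p, best_f = p, f
--     return best_p, best_f
-- ===== Notes on version B (the rewrite author's own statement) =====
-- stated objective: simpler
-- what changed: Replaced the group-by-fish-count dictionary plus max-over-keys plus min-over-group with a single pass that keeps the best (participant, fish) pair seen so far.
import Mathlib
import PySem

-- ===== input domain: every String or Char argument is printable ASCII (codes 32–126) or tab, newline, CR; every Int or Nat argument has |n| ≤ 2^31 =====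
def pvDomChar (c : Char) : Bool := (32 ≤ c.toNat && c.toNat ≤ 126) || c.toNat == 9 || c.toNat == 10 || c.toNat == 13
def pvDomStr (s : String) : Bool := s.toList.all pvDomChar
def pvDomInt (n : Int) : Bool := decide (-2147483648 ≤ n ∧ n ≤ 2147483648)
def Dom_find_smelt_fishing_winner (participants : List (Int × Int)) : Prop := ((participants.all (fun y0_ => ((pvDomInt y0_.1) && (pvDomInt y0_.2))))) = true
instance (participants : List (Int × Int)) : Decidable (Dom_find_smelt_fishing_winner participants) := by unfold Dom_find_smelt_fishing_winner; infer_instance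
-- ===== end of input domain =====

-- B replaces A's group-by-fish-count dictionary (then max over keys, min over the winning group)
-- by a single pass keeping the best (participant, fish) pair so far; objective: simpler.
-- Both Pythons raise on an empty participants list (ValueError / IndexError): excluded by Pre_.


-- ===== PORT A =====
def find_smelt_fishing_winner (participants : List (Int × Int)) : Int × Int :=
  let fish_dict := participants.foldl
      (fun d pf =>
        (if d.contains pf.2 then d else d.insert pf.2 ([] : List Int)).modify pf.2 []
          (fun l => l ++ [pf.1]))
      PySem.Dict.empty
  match PySem.List.max? fish_dict.keys (fun x => x) with
  | none => (0, 0)   -- max() of an empty dict raises ValueError; excluded by Pre_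
  | some max_fish_count =>
      match PySem.List.min? (fish_dict.getD max_fish_count []) (fun x => x) with
      | none => (0, 0)   -- unreachable: the group of the maximal key is nonempty
      | some winner => (winner, max_fish_count)

-- ===== PORT B =====
def find_smelt_fishing_winner_alt (participants : List (Int × Int)) : Int × Int :=
  match participants with
  | [] => (0, 0)   -- participants[0] raises IndexError; excluded by Pre_
  | x :: rest =>
      rest.foldl (fun b y => if b.2 < y.2 ∨ (y.2 = b.2 ∧ y.1 < b.1) then y else b) x

-- ===== PRECONDITION & SPEC =====
-- Pre_ excludes only the empty list, on which both Pythons raise (A: ValueError from max, B: IndexError).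
def Pre_find_smelt_fishing_winner (participants : List (Int × Int)) : Prop := participants ≠ []
instance (participants : List (Int × Int)) : Decidable (Pre_find_smelt_fishing_winner participants) := by unfold Pre_find_smelt_fishing_winner; infer_instance
def pvWitness_find_smelt_fishing_winner : (List (Int × Int)) := [(1, 2), (3, 2)]
def Spec_find_smelt_fishing_winner (participants : List (Int × Int)) (out : Int × Int) : Prop := out = find_smelt_fishing_winner_alt participants
instance (participants : List (Int × Int)) (out : Int × Int) : Decidable (Spec_find_smelt_fishing_winner participants out) := by unfold Spec_find_smelt_fishing_winner; infer_instance

-- ===== CLAIM (what is proved, stated in full; the proofs are below) =====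
def Claim_equal_find_smelt_fishing_winner : Prop := ∀ (participants : List (Int × Int)), Dom_find_smelt_fishing_winner participants → Pre_find_smelt_fishing_winner participants → Spec_find_smelt_fishing_winner participants (find_smelt_fishing_winner participants)

-- ===== LEMMAS AND PROOFS =====

-- A's loop body, as a named function (for the lemmas only; the port spells it out)
def pvStepA (d : PySem.Dict Int (List Int)) (pf : Int × Int) : PySem.Dict Int (List Int) :=
  (if d.contains pf.2 then d else d.insert pf.2 ([] : List Int)).modify pf.2 []
    (fun l => l ++ [pf.1])

lemma pvStepA_getD (d : PySem.Dict Int (List Int)) (pf : Int × Int) (c : Int) :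
    (pvStepA d pf).getD c [] =
      if c = pf.2 then d.getD c [] ++ [pf.1] else d.getD c [] := by
  unfold pvStepA
  rw [PySem.Dict.getD_modify]
  by_cases h : d.contains pf.2
  · rw [if_pos h]
    split_ifs with hc
    · subst hc; rfl
    · rfl
  · have h' : d.contains pf.2 = false := by simp [h]
    rw [if_neg h]
    split_ifs with hc
    · subst hc
      rw [PySem.Dict.getD_insert_self, PySem.Dict.getD_of_not_contains d [] h']
    · rw [PySem.Dict.getD_insert]
      rw [if_neg hc]

lemma pvStepA_contains (d : PySem.Dict Int (List Int)) (pf : Int × Int) (k : Int) :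
    (pvStepA d pf).contains k = (k == pf.2 || d.contains k) := by
  unfold pvStepA
  by_cases h : d.contains pf.2
  · rw [if_pos h, PySem.Dict.contains_modify]
  · rw [if_neg h, PySem.Dict.contains_modify, PySem.Dict.contains_insert]
    cases k == pf.2 <;> simp

lemma pvFoldA_getD (ps : List (Int × Int)) :
    ∀ (d : PySem.Dict Int (List Int)) (c : Int),
      (ps.foldl pvStepA d).getD c [] =
        d.getD c [] ++ (ps.filter (fun p => p.2 == c)).map Prod.fst := by
  induction ps with
  | nil => intro d c; simp
  | cons hd tl ih =>
    intro d c
    simp only [List.foldl_cons, List.filter_cons]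
    rw [ih, pvStepA_getD]
    by_cases hc : c = hd.2
    · subst hc
      rw [if_pos rfl]
      simp [List.append_assoc]
    · have hb : (hd.2 == c) = false := by
        simp only [beq_eq_false_iff_ne, ne_eq]
        exact fun h => hc h.symm
      rw [if_neg hc, hb]
      simp

lemma pvFoldA_contains (ps : List (Int × Int)) :
    ∀ (d : PySem.Dict Int (List Int)) (k : Int),
      ((ps.foldl pvStepA d).contains k = true ↔
        d.contains k = true ∨ ∃ p ∈ ps, p.2 = k) := by
  induction ps with
  | nil => intro d k; simp
  | cons hd tl ih =>
    intro d k
    simp only [List.foldl_cons]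
    rw [ih, pvStepA_contains]
    constructor
    · rintro (hor | hex)
      · rcases Bool.or_eq_true_iff.mp hor with hb | hb
        · exact Or.inr ⟨hd, List.mem_cons_self, (beq_iff_eq.mp hb).symm⟩
        · exact Or.inl hb
      · rcases hex with ⟨p, hp, hpk⟩
        exact Or.inr ⟨p, List.mem_cons_of_mem _ hp, hpk⟩
    · rintro (hc | ⟨p, hp, hpk⟩)
      · exact Or.inl (by rw [hc, Bool.or_true])
      · rcases List.mem_cons.mp hp with rfl | hp'
        · exact Or.inl (by rw [beq_iff_eq.mpr hpk.symm, Bool.true_or])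
        · exact Or.inr ⟨p, hp', hpk⟩

-- B side: "y is no better than r" under (more fish, then lower number)
def pvLeB (y r : Int × Int) : Prop := y.2 < r.2 ∨ (y.2 = r.2 ∧ r.1 ≤ y.1)

lemma pvLeB_refl (x : Int × Int) : pvLeB x x := by unfold pvLeB; omega

lemma pvLeB_trans {a b c : Int × Int} (h1 : pvLeB a b) (h2 : pvLeB b c) : pvLeB a c := by
  unfold pvLeB at *; omega

lemma pvFoldB (l : List (Int × Int)) :
    ∀ (x : Int × Int),
      (l.foldl (fun b y => if b.2 < y.2 ∨ (y.2 = b.2 ∧ y.1 < b.1) then y else b) x = x ∨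
        l.foldl (fun b y => if b.2 < y.2 ∨ (y.2 = b.2 ∧ y.1 < b.1) then y else b) x ∈ l) ∧
      ∀ y, (y = x ∨ y ∈ l) →
        pvLeB y (l.foldl (fun b y => if b.2 < y.2 ∨ (y.2 = b.2 ∧ y.1 < b.1) then y else b) x) := by
  induction l with
  | nil =>
    intro x
    refine ⟨Or.inl rfl, ?_⟩
    rintro y (rfl | hmem)
    · exact pvLeB_refl y
    · simp at hmem
  | cons z tl ih =>
    intro x
    have hmem : (if x.2 < z.2 ∨ (z.2 = x.2 ∧ z.1 < x.1) then z else x) = z ∨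
        (if x.2 < z.2 ∨ (z.2 = x.2 ∧ z.1 < x.1) then z else x) = x := by
      by_cases hcond : x.2 < z.2 ∨ (z.2 = x.2 ∧ z.1 < x.1) <;> simp [hcond]
    have hlex : pvLeB x (if x.2 < z.2 ∨ (z.2 = x.2 ∧ z.1 < x.1) then z else x) := by
      by_cases hcond : x.2 < z.2 ∨ (z.2 = x.2 ∧ z.1 < x.1) <;>
        simp only [hcond, if_true, if_false] <;> unfold pvLeB <;> omega
    have hlez : pvLeB z (if x.2 < z.2 ∨ (z.2 = x.2 ∧ z.1 < x.1) then z else x) := by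
      by_cases hcond : x.2 < z.2 ∨ (z.2 = x.2 ∧ z.1 < x.1) <;>
        simp only [hcond, if_true, if_false] <;> unfold pvLeB <;> omega
    simp only [List.foldl_cons]
    refine ⟨?_, ?_⟩
    · rcases (ih _).1 with heq | hin
      · rcases hmem with h' | h'
        · exact Or.inr (by rw [heq, h']; exact List.mem_cons_self)
        · exact Or.inl (heq.trans h')
      · exact Or.inr (List.mem_cons_of_mem _ hin)
    · have hstep := (ih (if x.2 < z.2 ∨ (z.2 = x.2 ∧ z.1 < x.1) then z else x)).2 _ (Or.inl rfl)
      rintro y (rfl | hy)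
      · exact pvLeB_trans hlex hstep
      · rcases List.mem_cons.mp hy with rfl | hy'
        · exact pvLeB_trans hlez hstep
        · exact (ih _).2 y (Or.inr hy')

-- ===== VERDICT (by name: the statement is the Claim_ definition above) =====
theorem find_smelt_fishing_winner_spec : Claim_equal_find_smelt_fishing_winner := by
  intro ps _ hpre
  unfold Spec_find_smelt_fishing_winner
  obtain ⟨h, t, rfl⟩ : ∃ h t, ps = h :: t := by
    cases ps with
    | nil => exact absurd rfl hpre
    | cons h t => exact ⟨h, t, rfl⟩
  -- B's result is one of the participants and beats all of them
  have hBmem : t.foldl (fun b y => if b.2 < y.2 ∨ (y.2 = b.2 ∧ y.1 < b.1) then y else b) h ∈ h :: t := by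
    rcases (pvFoldB t h).1 with h1 | h1
    · exact by rw [h1]; exact List.mem_cons_self
    · exact List.mem_cons_of_mem _ h1
  have hBbest : ∀ y ∈ h :: t,
      pvLeB y (t.foldl (fun b y => if b.2 < y.2 ∨ (y.2 = b.2 ∧ y.1 < b.1) then y else b) h) := by
    intro y hy
    exact (pvFoldB t h).2 y (List.mem_cons.mp hy)
  -- the dictionary facts
  have hkeys : ∀ k, k ∈ ((h :: t).foldl pvStepA PySem.Dict.empty).keys ↔ ∃ p ∈ h :: t, p.2 = k := by
    intro k
    rw [← PySem.Dict.contains_iff_mem_keys, pvFoldA_contains]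
    rw [PySem.Dict.contains_empty]
    constructor
    · rintro (hfalse | hex)
      · exact absurd hfalse (by simp)
      · exact hex
    · exact Or.inr
  have hgroup : ∀ c, ((h :: t).foldl pvStepA PySem.Dict.empty).getD c [] =
      ((h :: t).filter (fun p => p.2 == c)).map Prod.fst := by
    intro c
    rw [pvFoldA_getD, PySem.Dict.getD_empty, List.nil_append]
  -- rewrite the two ports into workable shape
  have hport : find_smelt_fishing_winner (h :: t) =
      (match PySem.List.max? ((h :: t).foldl pvStepA PySem.Dict.empty).keys (fun x => x) with
       | none => (0, 0)
       | some max_fish_count =>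
          match PySem.List.min? (((h :: t).foldl pvStepA PySem.Dict.empty).getD max_fish_count [])
              (fun x => x) with
          | none => (0, 0)
          | some winner => (winner, max_fish_count)) := rfl
  have halt : find_smelt_fishing_winner_alt (h :: t) =
      t.foldl (fun b y => if b.2 < y.2 ∨ (y.2 = b.2 ∧ y.1 < b.1) then y else b) h := rfl
  rw [hport, halt]
  cases hmax : PySem.List.max? ((h :: t).foldl pvStepA PySem.Dict.empty).keys (fun x => x) with
  | none =>
    exfalso
    have hk : h.2 ∈ ((h :: t).foldl pvStepA PySem.Dict.empty).keys :=
      (hkeys h.2).mpr ⟨h, List.mem_cons_self, rfl⟩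
    rw [(PySem.List.max?_eq_none_iff _ _).mp hmax] at hk
    simp at hk
  | some M =>
    have hMmem : M ∈ ((h :: t).foldl pvStepA PySem.Dict.empty).keys := PySem.List.max?_mem hmax
    have hMmax : ∀ k ∈ ((h :: t).foldl pvStepA PySem.Dict.empty).keys, k ≤ M :=
      fun k hk => PySem.List.max?_isMax hmax k hk
    obtain ⟨pM, hpMmem, hpM2⟩ := (hkeys M).mp hMmem
    show (match PySem.List.min? (((h :: t).foldl pvStepA PySem.Dict.empty).getD M []) (fun x => x) with
          | none => (0, 0)
          | some winner => (winner, M)) =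
        t.foldl (fun b y => if b.2 < y.2 ∨ (y.2 = b.2 ∧ y.1 < b.1) then y else b) h
    cases hmin : PySem.List.min? (((h :: t).foldl pvStepA PySem.Dict.empty).getD M []) (fun x => x) with
    | none =>
      exfalso
      have hnil := (PySem.List.min?_eq_none_iff _ _).mp hmin
      rw [hgroup] at hnil
      have hmemf : pM.1 ∈ ((h :: t).filter (fun p => p.2 == M)).map Prod.fst :=
        List.mem_map.mpr ⟨pM, List.mem_filter.mpr ⟨hpMmem, beq_iff_eq.mpr hpM2⟩, rfl⟩
      rw [hnil] at hmemf
      simp at hmemf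
    | some w =>
      have hwmem := PySem.List.min?_mem hmin
      have hwmin : ∀ v ∈ ((h :: t).foldl pvStepA PySem.Dict.empty).getD M [], w ≤ v :=
        fun v hv => PySem.List.min?_isMin hmin v hv
      rw [hgroup] at hwmem hwmin
      obtain ⟨pw, hpwf, hpw1⟩ := List.mem_map.mp hwmem
      obtain ⟨hpwmem, hpw2⟩ := List.mem_filter.mp hpwf
      have hpw2' : pw.2 = M := beq_iff_eq.mp hpw2
      -- every participant's fish count is ≤ M
      have hallM : ∀ p ∈ h :: t, p.2 ≤ M :=
        fun p hp => hMmax p.2 ((hkeys p.2).mpr ⟨p, hp, rfl⟩)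
      -- every participant with fish count M has number ≥ w
      have hallw : ∀ p ∈ h :: t, p.2 = M → w ≤ p.1 := by
        intro p hp hp2
        exact hwmin p.1 (List.mem_map.mpr ⟨p, List.mem_filter.mpr ⟨hp, beq_iff_eq.mpr hp2⟩, rfl⟩)
      -- conclude that B's running best equals (w, M)
      have hbw := hBbest pw hpwmem
      unfold pvLeB at hbw
      have h1 := hallM _ hBmem
      have hf2 : (t.foldl (fun b y => if b.2 < y.2 ∨ (y.2 = b.2 ∧ y.1 < b.1) then y else b) h).2 = M := by
        omega
      have h2 := hallw _ hBmem hf2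
      show (w, M) = t.foldl (fun b y => if b.2 < y.2 ∨ (y.2 = b.2 ∧ y.1 < b.1) then y else b) h
      refine Prod.ext_iff.mpr ⟨?_, ?_⟩
      · show w = (t.foldl (fun b y => if b.2 < y.2 ∨ (y.2 = b.2 ∧ y.1 < b.1) then y else b) h).1
        omega
      · exact hf2.symm
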